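-- pv_equiv track=rewrite | github.com/min9nim/python-study | src/2025-03-21-nums-prefix-sum.py | solution
-- ===== SOURCE A (Python) =====
-- def solution(nums, k):
--     m = len(nums)
--
--     acc = []
--     for i in range(m):
--         acc.append(nums[i] + (acc[i-1] if i-1 >= 0 else 0))
--
--     answer = []
--     for i in range(m):
--         answer.append(acc[i+k if i+k < m else m-1] - (acc[i-k-1] if i-k-1 >= 0 else 0))
--
--     return answer
-- ===== SOURCE B (Python) =====
-- def solution(nums, k):
--     m = len(nums)
--     return [sum(nums[max(0, i - k):min(i + k, m - 1) + 1]) for i in range(m)]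
-- ===== Notes on version B (the rewrite author's own statement) =====
-- stated objective: simpler
-- what changed: B drops A's prefix-sum array entirely and computes each answer element as a direct sum over the clamped slice nums[max(0,i-k):min(i+k,m-1)+1], a one-liner with no precomputed table.
-- outside the precondition, e.g. on solution([1, 2, 3], -1): A returns [5, -2, -3], B returns [0, 0, 0]
import Mathlib
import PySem

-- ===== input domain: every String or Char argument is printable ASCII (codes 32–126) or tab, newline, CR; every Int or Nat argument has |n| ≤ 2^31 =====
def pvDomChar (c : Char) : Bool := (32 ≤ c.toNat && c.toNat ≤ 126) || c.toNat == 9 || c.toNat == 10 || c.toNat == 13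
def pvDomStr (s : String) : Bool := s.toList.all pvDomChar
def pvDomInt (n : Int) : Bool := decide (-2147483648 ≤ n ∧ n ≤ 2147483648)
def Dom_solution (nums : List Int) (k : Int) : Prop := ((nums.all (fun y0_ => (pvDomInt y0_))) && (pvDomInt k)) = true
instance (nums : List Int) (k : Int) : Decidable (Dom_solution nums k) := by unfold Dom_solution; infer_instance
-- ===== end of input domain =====

-- B drops A's prefix-sum array and sums each clamped window slice directly (simpler, no precomputed table); A and B agree for every k ≥ 0.


-- ===== PORT A =====
-- literal transliteration of Source A: build the prefix-sum list acc, then read answers off it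
def solution (nums : List Int) (k : Int) : List Int :=
  let m : Int := nums.length
  let acc : List Int := (PySem.List.pyRange 0 m 1).foldl
    (fun acc i =>
      acc ++ [PySem.List.pyGetD nums i 0 +
              (if i - 1 ≥ 0 then PySem.List.pyGetD acc (i - 1) 0 else 0)]) []
  (PySem.List.pyRange 0 m 1).foldl
    (fun answer i =>
      answer ++ [PySem.List.pyGetD acc (if i + k < m then i + k else m - 1) 0 -
                 (if i - k - 1 ≥ 0 then PySem.List.pyGetD acc (i - k - 1) 0 else 0)]) []

-- ===== PORT B =====
-- literal transliteration of Source B: one clamped slice-sum per index, no prefix array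
def solution_alt (nums : List Int) (k : Int) : List Int :=
  let m : Int := nums.length
  (PySem.List.pyRange 0 m 1).map
    (fun i => (PySem.List.slice nums (some (max 0 (i - k))) (some (min (i + k) (m - 1) + 1))).sum)

-- ===== PRECONDITION & SPEC =====
-- Pre_ restricts to the natural window-size domain k ≥ 0: for negative k A raises
-- IndexError (k ≤ -2, nums nonempty — acc[i-k-1] runs past the end) or, for k = -1,
-- returns accidental negative-index-wraparound values.
def Pre_solution (nums : List Int) (k : Int) : Prop := 0 ≤ k
instance (nums : List Int) (k : Int) : Decidable (Pre_solution nums k) := by unfold Pre_solution; infer_instance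
def pvWitness_solution : List Int × Int := ([1, 2, 3], 1)

def Spec_solution (nums : List Int) (k : Int) (out : List Int) : Prop := out = solution_alt nums k
instance (nums : List Int) (k : Int) (out : List Int) : Decidable (Spec_solution nums k out) := by unfold Spec_solution; infer_instance

-- ===== CLAIM (what is proved, stated in full; the proofs are below) =====
def Claim_equal_solution : Prop := ∀ (nums : List Int) (k : Int), Dom_solution nums k → Pre_solution nums k → Spec_solution nums k (solution nums k)

-- ===== LEMMAS AND PROOFS =====

theorem sum_slice (nums : List Int) (a b : Nat) (h : a ≤ b) :
    ((nums.drop a).take (b - a)).sum = (nums.take b).sum - (nums.take a).sum := by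
  have hb : b = a + (b - a) := by omega
  conv_rhs => rw [hb, List.take_add]
  rw [List.sum_append]
  omega

theorem acc_inv (nums : List Int) (n : Nat) (hn : n ≤ nums.length) :
    ((List.range n).map (fun (j : Nat) => (j : Int))).foldl
      (fun acc i =>
        acc ++ [PySem.List.pyGetD nums i 0 +
                (if i - 1 ≥ 0 then PySem.List.pyGetD acc (i - 1) 0 else 0)]) []
    = (List.range n).map (fun j => ((nums.take (j + 1)).sum)) := by
  induction n with
  | zero => simp
  | succ n ih =>
    have hn' : n ≤ nums.length := by omega
    rw [List.range_succ]
    simp only [List.map_append, List.foldl_append]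
    rw [ih hn']
    simp only [List.map_cons, List.map_nil, List.foldl_cons, List.foldl_nil]
    congr 1
    have hlt : n < nums.length := by omega
    have h1 : PySem.List.pyGetD nums (n : Int) 0 = nums[n] := by
      rw [PySem.List.pyGetD_natCast, List.getD_eq_getElem _ _ hlt]
    rw [h1]
    cases n with
    | zero =>
      simp [List.sum_take_succ nums 0 hlt]
    | succ j =>
      have hif : ((j + 1 : Nat) : Int) - 1 ≥ 0 := by push_cast; omega
      rw [if_pos hif]
      have hcast : ((j + 1 : Nat) : Int) - 1 = (j : Int) := by push_cast; ring
      rw [hcast, PySem.List.pyGetD_natCast]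
      have hjlen : j < ((List.range (j+1)).map (fun j => ((nums.take (j + 1)).sum))).length := by simp
      rw [List.getD_eq_getElem _ _ hjlen]
      simp only [List.getElem_map, List.getElem_range]
      rw [List.sum_take_succ nums (j+1) hlt]
      ring

def prefL (nums : List Int) : List Int :=
  (List.range nums.length).map (fun j => ((nums.take (j + 1)).sum))

theorem prefL_getD (nums : List Int) (j : Nat) (h : j < nums.length) :
    (prefL nums).getD j 0 = (nums.take (j + 1)).sum := by
  unfold prefL
  rw [List.getD_eq_getElem _ _ (by simpa using h)]
  simp

theorem main_pt (nums : List Int) (k : Int) (hk : 0 ≤ k) (n : Nat) (hn : n < nums.length) :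
    PySem.List.pyGetD (prefL nums) (if (n : Int) + k < (nums.length : Int) then (n : Int) + k else (nums.length : Int) - 1) 0 -
      (if (n : Int) - k - 1 ≥ 0 then PySem.List.pyGetD (prefL nums) ((n : Int) - k - 1) 0 else 0)
    = (PySem.List.slice nums (some (max 0 ((n : Int) - k))) (some (min ((n : Int) + k) ((nums.length : Int) - 1) + 1))).sum := by
  set m := nums.length with hm
  set κ := k.toNat with hκ
  have hkc : k = (κ : Int) := by omega
  set hi : Nat := min (n + κ) (m - 1) with hhi
  set lo : Nat := n - κ with hlo
  -- RHS
  have hmax : max 0 ((n : Int) - k) = (lo : Int) := by omega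
  have hmin : min ((n : Int) + k) ((m : Int) - 1) + 1 = ((hi + 1 : Nat) : Int) := by
    push_cast; omega
  rw [hmax, hmin, PySem.List.slice_natCast,
    sum_slice nums lo (hi + 1) (by omega)]
  -- LHS first term
  have hfirst : (if (n : Int) + k < (m : Int) then (n : Int) + k else (m : Int) - 1) = (hi : Int) := by
    split_ifs with h1 <;> push_cast <;> omega
  rw [hfirst]
  have hhi_lt : hi < m := by omega
  rw [PySem.List.pyGetD_natCast, prefL_getD nums hi hhi_lt]
  -- LHS second term
  split_ifs with h2
  · have : (n : Int) - k - 1 = ((lo - 1 : Nat) : Int) := by push_cast; omega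
    rw [this, PySem.List.pyGetD_natCast, prefL_getD nums (lo - 1) (by omega)]
    have : lo - 1 + 1 = lo := by omega
    rw [this]
  · have : lo = 0 := by omega
    simp [this]


-- ===== VERDICT (by name: the statement is the Claim_ definition above) =====
theorem solution_spec : Claim_equal_solution := by
  intro nums k _ hk
  unfold Spec_solution solution solution_alt
  dsimp only
  rw [PySem.List.pyRange_zero_natCast, acc_inv nums nums.length le_rfl,
    PySem.List.foldl_append_singleton_eq_map, List.nil_append, List.map_map, List.map_map]
  refine List.map_congr_left ?_
  intro n hn
  rw [List.mem_range] at hn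
  exact main_pt nums k hk n hn
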